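-- pv_equiv track=rewrite | github.com/Ammoniya/research | archive/generate_signatures.py | _generate_abstract_pattern
-- ===== SOURCE A (Python) =====
-- from typing import Dict, List, Optional, Tuple, Set
-- from collections import defaultdict
--
-- def _generate_abstract_pattern(patterns: List[str], vuln_type: str) -> str:
--     """Generate abstract signature pattern"""
--     # Categorize patterns
--     categories = defaultdict(list)
--     for pattern in patterns:
--         category, func = pattern.split(':', 1) if ':' in pattern else ('UNKNOWN', pattern)
--         categories[category].append(func)
--
--     # Build abstract pattern
--     signature_parts = []
--     for category, funcs in sorted(categories.items()):
--         signature_parts.append(f"{category}[{','.join(sorted(set(funcs)))}]")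
--
--     return f"{vuln_type}::{'|'.join(signature_parts)}"
-- ===== SOURCE B (Python) =====
-- def _generate_abstract_pattern(patterns, vuln_type):
--     pairs = [pattern.split(':', 1) if ':' in pattern else ['UNKNOWN', pattern]
--              for pattern in patterns]
--     cats = sorted({c for c, _ in pairs})
--     parts = [f"{c}[{','.join(sorted({f for c2, f in pairs if c2 == c}))}]" for c in cats]
--     return f"{vuln_type}::{'|'.join(parts)}"
-- ===== Notes on version B (the rewrite author's own statement) =====
-- stated objective: alternative
-- what changed: Replaces A's defaultdict(list) hash-bucketing with a flat list of split (category, func) pairs, a sorted set of distinct categories, and a per-category filter pass to collect each group's funcs; no dict is built.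
import Mathlib
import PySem

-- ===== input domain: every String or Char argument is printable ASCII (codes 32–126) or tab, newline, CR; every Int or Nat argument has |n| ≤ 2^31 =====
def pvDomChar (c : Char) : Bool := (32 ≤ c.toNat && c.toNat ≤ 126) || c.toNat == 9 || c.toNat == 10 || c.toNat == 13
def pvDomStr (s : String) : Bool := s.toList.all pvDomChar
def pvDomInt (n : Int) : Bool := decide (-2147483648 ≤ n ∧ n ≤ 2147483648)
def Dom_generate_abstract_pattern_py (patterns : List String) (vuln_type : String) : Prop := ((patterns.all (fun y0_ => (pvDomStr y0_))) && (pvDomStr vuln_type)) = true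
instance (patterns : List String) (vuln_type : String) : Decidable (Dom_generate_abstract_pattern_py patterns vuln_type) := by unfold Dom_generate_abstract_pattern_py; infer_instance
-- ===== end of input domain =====

-- B replaces A's defaultdict bucketing by a sort-then-scan: sorted distinct categories,
-- then a per-category filter of the split pairs (objective: alternative traversal, same result).


-- Shared helper: `pattern.split(':', 1) if ':' in pattern else ('UNKNOWN', pattern)`
-- (this exact expression occurs verbatim in both A and B).
-- When ':' occurs in p, split(':', 1) yields exactly two pieces; the wildcard branch is unreachable.
def pvSplitPat (p : String) : String × String :=
  if PySem.Str.isIn ":" p then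
    match PySem.Str.splitMax? p ":" 1 with
    | some (c :: f :: _) => (c, f)
    | _ => ("UNKNOWN", p)
  else ("UNKNOWN", p)

-- ===== PORT A =====
-- defaultdict(list) bucketing; sorted(categories.items()) is ported as a key-sort on the
-- category (dict keys are unique, so Python's tuple comparison never reaches the second component).
def generate_abstract_pattern_py (patterns : List String) (vuln_type : String) : String :=
  let categories : PySem.Dict String (List String) :=
    patterns.foldl (fun d pattern =>
      let cf := pvSplitPat pattern
      d.modify cf.1 [] (fun fs => fs ++ [cf.2])) PySem.Dict.empty
  let signature_parts : List String :=
    (PySem.List.sorted categories.items (fun kv => kv.1)).foldl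
      (fun acc kv =>
        acc ++ [kv.1 ++ "[" ++
          PySem.Str.join "," (PySem.List.sorted (PySem.Set.ofList kv.2) (fun x => x)) ++ "]"]) []
  vuln_type ++ "::" ++ PySem.Str.join "|" signature_parts

-- ===== PORT B =====
def generate_abstract_pattern_py_alt (patterns : List String) (vuln_type : String) : String :=
  let pairs := patterns.map pvSplitPat
  let cats := PySem.List.sorted (PySem.Set.ofList (pairs.map (fun q => q.1))) (fun x => x)
  let parts := cats.map (fun c =>
    c ++ "[" ++
      PySem.Str.join ","
        (PySem.List.sorted
          (PySem.Set.ofList ((pairs.filter (fun q => q.1 == c)).map (fun q => q.2)))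
          (fun x => x)) ++ "]")
  vuln_type ++ "::" ++ PySem.Str.join "|" parts

-- ===== PRECONDITION & SPEC =====
def Spec_generate_abstract_pattern_py (patterns : List String) (vuln_type : String) (out : String) : Prop := out = generate_abstract_pattern_py_alt patterns vuln_type
instance (patterns : List String) (vuln_type : String) (out : String) : Decidable (Spec_generate_abstract_pattern_py patterns vuln_type out) := by unfold Spec_generate_abstract_pattern_py; infer_instance

-- ===== CLAIM (what is proved, stated in full; the proofs are below) =====
def Claim_equal_generate_abstract_pattern_py : Prop := ∀ (patterns : List String) (vuln_type : String), Dom_generate_abstract_pattern_py patterns vuln_type → Spec_generate_abstract_pattern_py patterns vuln_type (generate_abstract_pattern_py patterns vuln_type)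

-- ===== LEMMAS AND PROOFS =====

-- A's dict, described through B's vocabulary: its keys are the distinct categories in order,
-- and each bucket is the (order-preserving) filter of the split pairs at that category.
theorem pv_dict_keys (patterns : List String) :
    (patterns.foldl (fun d pattern =>
        d.modify (pvSplitPat pattern).1 [] (fun fs => fs ++ [(pvSplitPat pattern).2]))
        PySem.Dict.empty).keys
      = PySem.Set.ofList ((patterns.map pvSplitPat).map (fun q => q.1)) := by
  have h := PySem.Dict.keys_foldl_modify_key patterns (fun p => (pvSplitPat p).1) []
      (fun _ p _fs => _fs ++ [(pvSplitPat p).2]) PySem.Dict.empty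
  simp only [PySem.Dict.keys_empty] at h
  rw [show (fun (d : PySem.Dict String (List String)) (pattern : String) =>
        d.modify (pvSplitPat pattern).1 [] (fun fs => fs ++ [(pvSplitPat pattern).2]))
      = (fun d p => d.modify ((pvSplitPat p).1) []
          ((fun (_ : PySem.Dict String (List String)) (p : String)
              (_fs : List String) => _fs ++ [(pvSplitPat p).2]) d p)) from rfl, h,
    PySem.Set.update_nil_left, List.map_map]
  rfl

theorem pv_dict_getD (patterns : List String) (c : String) :
    (patterns.foldl (fun d pattern =>
        d.modify (pvSplitPat pattern).1 [] (fun fs => fs ++ [(pvSplitPat pattern).2]))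
        PySem.Dict.empty).getD c []
      = ((patterns.map pvSplitPat).filter (fun q => q.1 == c)).map (fun q => q.2) := by
  have h : patterns.foldl (fun d pattern =>
        d.modify (pvSplitPat pattern).1 [] (fun fs => fs ++ [(pvSplitPat pattern).2]))
        PySem.Dict.empty
      = (patterns.map pvSplitPat).foldl
          (fun d q => d.modify q.1 [] (fun x => x ++ [q.2])) PySem.Dict.empty :=
    by rw [List.foldl_map]
  rw [h, PySem.Dict.getD_foldl_modify_append, PySem.Dict.getD_empty, List.nil_append]

theorem generate_abstract_pattern_py_eq_alt (patterns : List String) (vuln_type : String) :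
    generate_abstract_pattern_py patterns vuln_type
      = generate_abstract_pattern_py_alt patterns vuln_type := by
  unfold generate_abstract_pattern_py generate_abstract_pattern_py_alt
  dsimp only
  set pairs := patterns.map pvSplitPat with hpairs
  set d := patterns.foldl (fun d pattern =>
      d.modify (pvSplitPat pattern).1 [] (fun fs => fs ++ [(pvSplitPat pattern).2]))
      PySem.Dict.empty with hd
  set cats := PySem.List.sorted (PySem.Set.ofList (pairs.map (fun q => q.1))) (fun x => x)
    with hcats
  have hkeys : d.keys = PySem.Set.ofList (pairs.map (fun q => q.1)) := pv_dict_keys patterns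
  have hnd : d.keys.Nodup := by rw [hkeys]; exact PySem.Set.nodup_ofList _
  -- sorted(items) is the sorted distinct categories paired with their buckets
  have hsorted : PySem.List.sorted d.items (fun kv => kv.1)
      = cats.map (fun k => (k, d.getD k [])) := by
    apply PySem.List.sorted_eq_of_perm_of_pairwise_lt
    · have hperm : cats.Perm d.keys := by
        rw [hkeys]; exact PySem.List.sorted_perm _ _ _
      calc (cats.map (fun k => (k, d.getD k []))).Perm
            (d.keys.map (fun k => (k, d.getD k []))) := hperm.map _
        _ = d.items := (PySem.Dict.items_eq_map_keys d hnd []).symm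
    · have : List.Pairwise (fun a b => a < b) cats := by
        rw [hcats]; exact PySem.List.sorted_ofList_pairwise_lt _
      exact List.Pairwise.map _ (fun a b h => h) this
  rw [hsorted, PySem.List.foldl_append_singleton_eq_map, List.nil_append, List.map_map]
  congr 2
  apply List.map_congr_left
  intro c _
  simp only [Function.comp]
  rw [hd, pv_dict_getD patterns c, hpairs]

-- ===== VERDICT (by name: the statement is the Claim_ definition above) =====
theorem generate_abstract_pattern_py_spec : Claim_equal_generate_abstract_pattern_py := by
  intro patterns vuln_type _
  exact generate_abstract_pattern_py_eq_alt patterns vuln_type
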